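-- pv_equiv track=rewrite | github.com/DMFTwDFT-project/DMFTwDFT3 | bin/postDMFT.py | Make_coor_list
-- ===== SOURCE A (Python) =====
-- def Make_coor_list(ord_ST, nord_ST):
--     idx = []
--     for ST in ord_ST:
--         for i, nord in enumerate(nord_ST):
--             for cmps in nord:
--                 if ST == cmps:
--                     idx.append(i)
--                     break
--     return idx
-- ===== SOURCE B (Python) =====
-- def Make_coor_list(ord_ST, nord_ST):
--     # Build an inverted index once: element -> sorted list of sublist indices containing it
--     mapping = {}
--     for i, nord in enumerate(nord_ST):
--         seen = set()
--         for cmps in nord: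
--             if cmps not in seen:
--                 seen.add(cmps)
--                 mapping[cmps] = mapping.get(cmps, []) + [i]
--     idx = []
--     for ST in ord_ST:
--         idx.extend(mapping.get(ST, []))
--     return idx
-- ===== Notes on version B (the rewrite author's own statement) =====
-- stated objective: faster
-- what changed: A rescans every sublist for every queried element (nested loops); B builds an inverted index element->sorted index list in one pass over nord_ST (deduping within each sublist) and then answers each ord_ST element by a single dict lookup.
import Mathlib
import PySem

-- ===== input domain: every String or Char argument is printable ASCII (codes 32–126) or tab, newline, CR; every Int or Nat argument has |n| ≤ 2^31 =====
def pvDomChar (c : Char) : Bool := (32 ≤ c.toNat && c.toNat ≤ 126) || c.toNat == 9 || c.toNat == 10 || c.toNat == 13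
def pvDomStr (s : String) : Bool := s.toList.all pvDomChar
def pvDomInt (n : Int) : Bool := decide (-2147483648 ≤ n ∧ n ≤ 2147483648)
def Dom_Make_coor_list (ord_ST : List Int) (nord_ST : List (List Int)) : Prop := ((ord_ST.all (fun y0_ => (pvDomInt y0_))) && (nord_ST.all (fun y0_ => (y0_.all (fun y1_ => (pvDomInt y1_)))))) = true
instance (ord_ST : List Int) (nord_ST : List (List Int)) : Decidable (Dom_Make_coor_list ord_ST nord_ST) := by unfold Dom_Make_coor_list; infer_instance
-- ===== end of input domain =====

-- B replaces A's per-element rescans of nord_ST by an inverted index built once, then one lookup per element (faster).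

-- ===== PORT A =====
-- inner 'for cmps in nord: if ST == cmps: idx.append(i); break'
def pvInnerA (ST i : Int) (idx : List Int) : List Int → List Int
  | [] => idx
  | c :: rest => if ST == c then idx ++ [i] else pvInnerA ST i idx rest

def Make_coor_list (ord_ST : List Int) (nord_ST : List (List Int)) : List Int :=
  ord_ST.foldl (fun idx ST =>
    (PySem.List.enumerate nord_ST).foldl (fun idx p => pvInnerA ST p.1 idx p.2) idx) []

-- ===== PORT B =====
-- inner loop of the index build: per-sublist seen-set + mapping[cmps] = mapping.get(cmps, []) + [i]
def pvInnerB (i : Int) (sd : PySem.Set Int × PySem.Dict Int (List Int)) (nord : List Int) :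
    PySem.Set Int × PySem.Dict Int (List Int) :=
  nord.foldl (fun sd c =>
    if sd.1.contains c then sd
    else (PySem.Set.add sd.1 c, sd.2.modify c [] (· ++ [i]))) sd

def Make_coor_list_alt (ord_ST : List Int) (nord_ST : List (List Int)) : List Int :=
  let mapping := (PySem.List.enumerate nord_ST).foldl
    (fun d p => (pvInnerB p.1 (PySem.Set.empty, d) p.2).2) PySem.Dict.empty
  ord_ST.foldl (fun idx ST => idx ++ mapping.getD ST []) []

-- ===== PRECONDITION & SPEC =====
def Spec_Make_coor_list (ord_ST : List Int) (nord_ST : List (List Int)) (out : List Int) : Prop := out = Make_coor_list_alt ord_ST nord_ST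
instance (ord_ST : List Int) (nord_ST : List (List Int)) (out : List Int) : Decidable (Spec_Make_coor_list ord_ST nord_ST out) := by unfold Spec_Make_coor_list; infer_instance

-- ===== CLAIM (what is proved, stated in full; the proofs are below) =====
def Claim_equal_Make_coor_list : Prop := ∀ (ord_ST : List Int) (nord_ST : List (List Int)), Dom_Make_coor_list ord_ST nord_ST → Spec_Make_coor_list ord_ST nord_ST (Make_coor_list ord_ST nord_ST)

-- ===== LEMMAS AND PROOFS =====

-- A's inner break loop appends i iff ST occurs in the sublist
theorem pvInnerA_eq (ST i : Int) (idx l : List Int) :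
    pvInnerA ST i idx l = idx ++ (if ST ∈ l then [i] else []) := by
  induction l with
  | nil => simp [pvInnerA]
  | cons c rest ih =>
    by_cases h : ST = c
    · simp [pvInnerA, h]
    · simp [pvInnerA, h, ih]

-- B's inner loop: effect on one key of the dict
theorem pvInnerB_getD (ST i : Int) (s : PySem.Set Int) (d : PySem.Dict Int (List Int))
    (l : List Int) :
    ((pvInnerB i (s, d) l).2).getD ST [] =
      d.getD ST [] ++ (if ST ∉ s ∧ ST ∈ l then [i] else []) := by
  induction l generalizing s d with
  | nil => simp [pvInnerB]
  | cons c rest ih =>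
    by_cases hc : c ∈ s
    · have hb : s.contains c = true := by simpa using hc
      simp only [pvInnerB, List.foldl_cons, hb, if_true]
      rw [show (rest.foldl _ (s, d)) = pvInnerB i (s, d) rest from rfl, ih]
      by_cases hstc : ST = c
      · subst hstc; simp [hc]
      · simp [hstc]
    · have hb : s.contains c = false := by simpa using hc
      simp only [pvInnerB, List.foldl_cons, hb, Bool.false_eq_true, if_false]
      rw [show (rest.foldl _ _) = pvInnerB i (PySem.Set.add s c, d.modify c [] (· ++ [i])) rest from rfl, ih]
      by_cases hstc : ST = c
      · subst hstc
        simp [PySem.Dict.getD_modify_self, hc]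
      · rw [PySem.Dict.getD_modify_of_ne _ _ _ hstc]
        simp [PySem.Set.mem_add, hstc]

-- the built mapping answers ST with the ascending indices of sublists containing ST
theorem pvMapping_getD (ST : Int) (L : List (Int × List Int)) (d : PySem.Dict Int (List Int)) :
    (L.foldl (fun d p => (pvInnerB p.1 (PySem.Set.empty, d) p.2).2) d).getD ST [] =
      d.getD ST [] ++ (L.filter (fun p => decide (ST ∈ p.2))).map (·.1) := by
  induction L generalizing d with
  | nil => simp
  | cons p rest ih =>
    simp only [List.foldl_cons, ih, pvInnerB_getD]
    by_cases h : ST ∈ p.2 <;> simp [h, PySem.Set.empty]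

-- ===== VERDICT (by name: the statement is the Claim_ definition above) =====
theorem Make_coor_list_spec : Claim_equal_Make_coor_list := by
  intro ord_ST nord_ST _
  unfold Spec_Make_coor_list Make_coor_list Make_coor_list_alt
  have hA : ∀ (idx : List Int) (ST : Int),
      (PySem.List.enumerate nord_ST).foldl (fun idx p => pvInnerA ST p.1 idx p.2) idx =
        idx ++ ((PySem.List.enumerate nord_ST).filter (fun p => decide (ST ∈ p.2))).map (·.1) := by
    intro idx ST
    induction (PySem.List.enumerate nord_ST) generalizing idx with
    | nil => simp
    | cons p rest ih =>
      rw [List.foldl_cons, pvInnerA_eq, ih, List.filter_cons]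
      by_cases h : ST ∈ p.2 <;> simp [h]
  have hB : ∀ ST : Int,
      ((PySem.List.enumerate nord_ST).foldl
        (fun d p => (pvInnerB p.1 (PySem.Set.empty, d) p.2).2) PySem.Dict.empty).getD ST [] =
        ((PySem.List.enumerate nord_ST).filter (fun p => decide (ST ∈ p.2))).map (·.1) := by
    intro ST; rw [pvMapping_getD]; simp
  simp only [hA, hB]
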